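-- pv_equiv track=rewrite | github.com/AP-MI-2021/lab-3-lazarcarla | main.py | get_longest_alternating_signs
-- ===== SOURCE A (Python) =====
-- def get_longest_alternating_signs(l):
--     '''
--     determina daca toate numerele au semne alternante in lista
--     :param l: lista formata din numere intregi
--     :return: True daca lista este formata doar din numere cu semne alternante, sau false in caz contrar
--     '''
--     if l!=[]:
--         if l[0]<0:
--             ok=False
--         else:
--             ok=True
--         for i in l[1:]:
--             if ok==False and i<0:
--                 return False
--             if ok==True and i>0:
--                 return False
--             ok=not ok
--         return True
--     return True
-- ===== SOURCE B (Python) =====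
-- def _chk(t):
--     # validate the canonical pattern: t[0] <= 0, t[1] >= 0, t[2] <= 0, ...
--     # consuming two elements per step
--     i = 0
--     n = len(t)
--     while i < n:
--         if t[i] > 0:
--             return False
--         if i + 1 == n:
--             return True
--         if t[i + 1] < 0:
--             return False
--         i += 2
--     return True
--
-- def get_longest_alternating_signs(l):
--     if not l:
--         return True
--     # normalize: a negative head means the mirrored pattern; negate the tail once
--     t = l[1:] if l[0] >= 0 else [-x for x in l[1:]]
--     return _chk(t)
-- ===== Notes on version B (the rewrite author's own statement) =====
-- stated objective: alternative
-- what changed: Instead of a single loop toggling a boolean flag, B first normalizes the input by negating the tail when the head is negative, then validates the one canonical pattern (<=0, >=0, ...) by a recursion that consumes two elements per step with no running state.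
import Mathlib
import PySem

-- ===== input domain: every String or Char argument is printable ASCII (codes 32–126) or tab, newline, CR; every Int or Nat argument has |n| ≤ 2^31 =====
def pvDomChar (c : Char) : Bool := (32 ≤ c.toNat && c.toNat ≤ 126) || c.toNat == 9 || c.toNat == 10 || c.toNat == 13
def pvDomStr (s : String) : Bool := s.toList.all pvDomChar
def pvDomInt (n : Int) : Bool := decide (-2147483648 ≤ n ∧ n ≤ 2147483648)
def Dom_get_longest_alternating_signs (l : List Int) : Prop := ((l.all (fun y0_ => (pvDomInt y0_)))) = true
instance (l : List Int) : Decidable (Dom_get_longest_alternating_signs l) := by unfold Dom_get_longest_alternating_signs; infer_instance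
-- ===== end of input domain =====

-- B removes A's toggling flag: it negates the tail once when the head is negative,
-- then checks the single canonical pattern by a two-elements-per-step recursion (objective: alternative).


-- ===== PORT A =====
-- the 'for i in l[1:]' loop with early returns and the toggling flag 'ok'
def pvALoop (rest : List Int) (ok : Bool) : Bool :=
  match rest with
  | [] => true
  | i :: t =>
    if ok = false ∧ i < 0 then false
    else if ok = true ∧ i > 0 then false
    else pvALoop t (!ok)

def get_longest_alternating_signs (l : List Int) : Bool :=
  match l with
  | [] => true
  | x :: t => pvALoop t (if x < 0 then false else true)

-- ===== PORT B =====
-- _chk: validate the canonical pattern (<=0, >=0, <=0, ...) two elements per step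
def pvChk (t : List Int) : Bool :=
  match t with
  | [] => true
  | [a] => if a > 0 then false else true
  | a :: b :: t' =>
    if a > 0 then false
    else if b < 0 then false
    else pvChk t'

def get_longest_alternating_signs_alt (l : List Int) : Bool :=
  match l with
  | [] => true
  | x :: t =>
    let t' := if 0 ≤ x then t else t.map (fun y => -y)
    pvChk t'

-- ===== PRECONDITION & SPEC =====
def Spec_get_longest_alternating_signs (l : List Int) (out : Bool) : Prop := out = get_longest_alternating_signs_alt l
instance (l : List Int) (out : Bool) : Decidable (Spec_get_longest_alternating_signs l out) := by unfold Spec_get_longest_alternating_signs; infer_instance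

-- ===== CLAIM (what is proved, stated in full; the proofs are below) =====
def Claim_equal_get_longest_alternating_signs : Prop := ∀ (l : List Int), Dom_get_longest_alternating_signs l → Spec_get_longest_alternating_signs l (get_longest_alternating_signs l)

-- ===== LEMMAS AND PROOFS =====

-- proof-side reformulation of A's loop without early returns
def pvCheck (t : List Int) (ok : Bool) : Bool :=
  match t with
  | [] => true
  | i :: t' => (if ok then decide (i ≤ 0) else decide (0 ≤ i)) && pvCheck t' (!ok)

lemma pvALoop_eq_pvCheck (t : List Int) (ok : Bool) : pvALoop t ok = pvCheck t ok := by
  induction t generalizing ok with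
  | nil => rfl
  | cons i t' ih =>
    simp only [pvALoop, pvCheck, ih]
    cases ok <;> by_cases h : i < 0 <;> by_cases h2 : i > 0 <;> simp_all

-- negating every element flips the flag
lemma pvCheck_map_neg (t : List Int) (ok : Bool) :
    pvCheck (t.map (fun y => -y)) ok = pvCheck t (!ok) := by
  induction t generalizing ok with
  | nil => rfl
  | cons i t' ih =>
    simp only [List.map_cons, pvCheck, ih, Bool.not_not]
    cases ok <;> simp

-- B's two-per-step checker is the flagged checker seeded true
lemma pvChk_eq_pvCheck (t : List Int) : pvChk t = pvCheck t true := by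
  induction t using pvChk.induct with
  | case1 => rfl
  | case2 a h => simp_all [pvChk, pvCheck]
  | case3 a h => simp_all [pvChk, pvCheck]
  | case4 a b t ih => simp_all [pvChk, pvCheck]
  | case5 a b t h ih => simp_all [pvChk, pvCheck]
  | case6 a b t h1 h2 ih =>
    simp only [pvChk, pvCheck, ih]
    simp [h1, h2, show a ≤ 0 by omega, show (0:Int) ≤ b by omega]

-- ===== VERDICT (by name: the statement is the Claim_ definition above) =====
theorem get_longest_alternating_signs_spec : Claim_equal_get_longest_alternating_signs := by
  intro l _
  unfold Spec_get_longest_alternating_signs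
  cases l with
  | nil => rfl
  | cons x t =>
    simp only [get_longest_alternating_signs, get_longest_alternating_signs_alt]
    by_cases hx : x < 0
    · have hx' : ¬ (0 ≤ x) := by omega
      have : pvChk (t.map (fun y => -y)) = pvCheck t false := by
        rw [pvChk_eq_pvCheck, pvCheck_map_neg]; rfl
      simp [hx, hx', pvALoop_eq_pvCheck, this]
    · have hx0 : 0 ≤ x := by omega
      simp [hx, hx0, pvALoop_eq_pvCheck, pvChk_eq_pvCheck]
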